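-- pv_equiv track=rewrite | github.com/wmm98/Get_Image_Brightness_Tool | Image/get_brihtness.py | find_diff_stability_data
-- ===== SOURCE A (Python) =====
-- def find_diff_stability_data(data):
--     stable_data = []
--     current_list = []
--
--     for i in range(len(data) - 1):
--         if abs(data[i] - data[i + 1]) < 3:
--             current_list.append({"index": i})
--         else:
--             if current_list:
--                 # current_list.append(data[i])
--                 current_list.append({"index": i})
--                 stable_data.append(current_list)
--                 current_list = []
--     if current_list:
--         # current_list.append(data[-1])
--         current_list.append({"index": i + 1})
--         stable_data.append(current_list)
--     if stable_data:
--         return stable_data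
-- ===== SOURCE B (Python) =====
-- def find_diff_stability_data(data):
--     flags = [abs(data[i] - data[i + 1]) < 3 for i in range(len(data) - 1)]
--     groups = []
--     i = 0
--     n = len(flags)
--     while i < n:
--         if flags[i]:
--             s = i
--             while i < n and flags[i]:
--                 i += 1
--             groups.append([{"index": j} for j in range(s, i + 1)])
--         else:
--             i += 1
--     return groups or None
-- ===== Notes on version B (the rewrite author's own statement) =====
-- stated objective: alternative
-- what changed: B precomputes the boolean flag list abs(data[i]-data[i+1])<3 and then scans it with a run-detection while loop (two pointers over runs), emitting each stable run's index range at once, instead of A's single fold that mutates a current_list/stable_data accumulator pair.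
import Mathlib
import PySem

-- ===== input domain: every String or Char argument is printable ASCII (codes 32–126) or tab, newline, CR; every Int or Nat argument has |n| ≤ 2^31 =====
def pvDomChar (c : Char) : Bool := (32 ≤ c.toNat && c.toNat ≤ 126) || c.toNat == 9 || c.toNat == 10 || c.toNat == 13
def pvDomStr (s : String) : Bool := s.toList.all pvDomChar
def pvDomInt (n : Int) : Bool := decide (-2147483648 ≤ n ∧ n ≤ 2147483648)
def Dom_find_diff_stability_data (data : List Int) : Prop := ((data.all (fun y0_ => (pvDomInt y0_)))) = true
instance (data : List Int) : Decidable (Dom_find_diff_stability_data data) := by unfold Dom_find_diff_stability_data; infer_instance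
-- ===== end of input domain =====

-- B rewrites A's accumulator fold as: precompute the flag list, then group maximal runs of true
-- flags with a run-scanning recursion (objective: alternative decomposition, same O(n) cost).

-- ===== PORT A =====
-- the dict {"index": i} as an association list
def pvDict (i : Nat) : List (String × Int) := [("index", (i : Int))]

-- A's loop body: state = (stable_data, current_list); indices produced by range(len(data)-1)
-- are always in bounds, so data.getD i 0 is exact for Python's data[i].
def aStep (data : List Int) (st : List (List (List (String × Int))) × List (List (String × Int)))
    (i : Nat) : List (List (List (String × Int))) × List (List (String × Int)) :=
  if |data.getD i 0 - data.getD (i + 1) 0| < 3 then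
    (st.1, st.2 ++ [pvDict i])
  else if st.2 ≠ [] then
    (st.1 ++ [st.2 ++ [pvDict i]], [])
  else
    st

def find_diff_stability_data (data : List Int) : Option (List (List (List (String × Int)))) :=
  let st := (List.range (data.length - 1)).foldl (aStep data) ([], [])
  -- the trailing flush: python's i+1 here equals len(data)-1 (only reached when the loop ran)
  let stable := if st.2 ≠ [] then st.1 ++ [st.2 ++ [pvDict (data.length - 1)]] else st.1
  if stable ≠ [] then some stable else none

-- ===== PORT B =====
-- length of the leading run of true flags
def runLen : List Bool → Nat
  | true :: fs => runLen fs + 1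
  | _ => 0

-- B's while loop: skip false flags; on a true flag consume the whole run (length k+1 flags,
-- covering indices i..i+k+1) and continue after it.
def bGroups : List Bool → Nat → List (List (List (String × Int)))
  | [], _ => []
  | false :: fs, i => bGroups fs (i + 1)
  | true :: fs, i =>
      let k := runLen fs
      ((List.range' i (k + 2)).map pvDict) :: bGroups (fs.drop k) (i + k + 1)
termination_by fs _ => fs.length
decreasing_by
  all_goals (simp; try omega)

def find_diff_stability_data_alt (data : List Int) : Option (List (List (List (String × Int)))) :=
  let flags := (List.range (data.length - 1)).map
    (fun i => decide (|data.getD i 0 - data.getD (i + 1) 0| < 3))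
  let groups := bGroups flags 0
  if groups ≠ [] then some groups else none

-- ===== PRECONDITION & SPEC =====
def Spec_find_diff_stability_data (data : List Int) (out : Option (List (List (List (String × Int))))) : Prop := out = find_diff_stability_data_alt data
instance (data : List Int) (out : Option (List (List (List (String × Int))))) : Decidable (Spec_find_diff_stability_data data out) := by unfold Spec_find_diff_stability_data; infer_instance

-- ===== CLAIM (what is proved, stated in full; the proofs are below) =====
def Claim_equal_find_diff_stability_data : Prop := ∀ (data : List Int), Dom_find_diff_stability_data data → Spec_find_diff_stability_data data (find_diff_stability_data data)

-- ===== LEMMAS AND PROOFS =====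

-- A's algorithm restructured over the flag list, with pending current_list cur:
-- exactly aStep's three cases, plus the trailing flush at the end index.
def aRec : List Bool → Nat → List (List (String × Int)) → List (List (List (String × Int)))
  | [], i, cur => if cur ≠ [] then [cur ++ [pvDict i]] else []
  | true :: fs, i, cur => aRec fs (i + 1) (cur ++ [pvDict i])
  | false :: fs, i, cur =>
      (if cur ≠ [] then [cur ++ [pvDict i]] else []) ++ aRec fs (i + 1) []

theorem bGroups_false (fs : List Bool) (i : Nat) : bGroups (false :: fs) i = bGroups fs (i + 1) := by
  simp [bGroups]

theorem bGroups_true (fs : List Bool) (i : Nat) :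
    bGroups (true :: fs) i
      = ((List.range' i (runLen fs + 2)).map pvDict)
          :: bGroups (fs.drop (runLen fs)) (i + runLen fs + 1) := by
  simp [bGroups]

-- A's fold (plus trailing flush) equals aRec on the corresponding flag list.
theorem fold_eq_aRec (data : List Int) : ∀ (m i : Nat) (cur : List (List (String × Int)))
    (st0 : List (List (List (String × Int)))),
    (let st := (List.range' i m).foldl (aStep data) (st0, cur)
     if st.2 ≠ [] then st.1 ++ [st.2 ++ [pvDict (i + m)]] else st.1)
    = st0 ++ aRec ((List.range' i m).map
        (fun j => decide (|data.getD j 0 - data.getD (j + 1) 0| < 3))) i cur := by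
  intro m
  induction m with
  | zero => intro i cur st0; by_cases h : cur = [] <;> simp [aRec, h]
  | succ m ih =>
    intro i cur st0
    rw [List.range'_succ]
    simp only [List.foldl_cons, List.map_cons]
    by_cases hc : |data.getD i 0 - data.getD (i + 1) 0| < 3
    · have hs : aStep data (st0, cur) i = (st0, cur ++ [pvDict i]) := by
        simp only [aStep, if_pos hc]
      rw [hs]
      simp only [hc, decide_true, aRec]
      rw [show i + (m + 1) = (i + 1) + m by omega]
      exact ih (i + 1) (cur ++ [pvDict i]) st0
    · by_cases hcur : cur = []
      · have hs : aStep data (st0, cur) i = (st0, cur) := by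
          simp only [aStep, if_neg hc]; simp [hcur]
        rw [hs, hcur]
        simp only [hc, decide_false, aRec, ite_false, not_true_eq_false,
          ne_eq, List.nil_append]
        rw [show i + (m + 1) = (i + 1) + m by omega]
        simpa using ih (i + 1) [] st0
      · have hs : aStep data (st0, cur) i = (st0 ++ [cur ++ [pvDict i]], []) := by
          simp only [aStep, if_neg hc]; simp [hcur]
        rw [hs]
        simp only [hc, decide_false, aRec]
        rw [if_pos (show cur ≠ [] from hcur),
          show i + (m + 1) = (i + 1) + m by omega, ← List.append_assoc]
        exact ih (i + 1) [] (st0 ++ [cur ++ [pvDict i]])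

-- after the leading true run the next flag (if any) is false
theorem drop_runLen : ∀ fs : List Bool,
    fs.drop (runLen fs) = [] ∨ ∃ rest, fs.drop (runLen fs) = false :: rest
  | [] => Or.inl rfl
  | true :: fs => by simpa [runLen] using drop_runLen fs
  | false :: fs => Or.inr ⟨fs, by simp [runLen]⟩

-- aRec with a nonempty pending group: the first emitted group is cur extended along the
-- leading true run (plus the break index), then the scan restarts empty after the run.
theorem aRec_pending : ∀ (fs : List Bool) (i : Nat) (cur : List (List (String × Int))),
    cur ≠ [] →
    aRec fs i cur
      = (cur ++ (List.range' i (runLen fs + 1)).map pvDict)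
          :: aRec (fs.drop (runLen fs + 1)) (i + runLen fs + 1) []
  | [], i, cur, h => by simp [aRec, runLen, h]
  | false :: fs, i, cur, h => by
      simp [aRec, runLen, h]
  | true :: fs, i, cur, h => by
      simp only [aRec, runLen]
      rw [aRec_pending fs (i + 1) (cur ++ [pvDict i]) (by simp),
        show i + 1 + runLen fs + 1 = i + (runLen fs + 1) + 1 by omega]
      simp [List.range'_succ, List.append_assoc]

-- aRec with empty pending list is exactly bGroups.
theorem aRec_eq_bGroups : ∀ (fs : List Bool) (i : Nat), aRec fs i [] = bGroups fs i
  | [], i => by simp [aRec, bGroups]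
  | false :: fs, i => by
      rw [bGroups_false]
      simpa [aRec] using aRec_eq_bGroups fs (i + 1)
  | true :: fs, i => by
      rw [bGroups_true]
      show aRec fs (i + 1) ([pvDict i]) = _
      rw [aRec_pending fs (i + 1) [pvDict i] (by simp),
        aRec_eq_bGroups (fs.drop (runLen fs + 1)) ((i + 1) + runLen fs + 1)]
      refine congrArg₂ List.cons ?_ ?_
      · simp [List.range'_succ]
      · rcases drop_runLen fs with hdrop | ⟨rest, hdrop⟩
        · have h2 : fs.drop (runLen fs + 1) = [] := by
            have := congrArg (List.drop 1) hdrop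
            simpa [List.drop_drop] using this
          rw [hdrop, h2]
          simp [bGroups]
        · have h2 : fs.drop (runLen fs + 1) = rest := by
            have := congrArg (List.drop 1) hdrop
            simpa [List.drop_drop] using this
          rw [hdrop, h2, bGroups_false,
            show i + 1 + runLen fs + 1 = i + runLen fs + 1 + 1 by omega]
termination_by fs _ => fs.length
decreasing_by
  all_goals simp

-- ===== VERDICT (by name: the statement is the Claim_ definition above) =====
theorem find_diff_stability_data_spec : Claim_equal_find_diff_stability_data := by
  intro data _
  unfold Spec_find_diff_stability_data
  have h := fold_eq_aRec data (data.length - 1) 0 [] []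
  simp only [Nat.zero_add, List.nil_append] at h
  simp only [find_diff_stability_data, find_diff_stability_data_alt, List.range_eq_range']
  rw [h, aRec_eq_bGroups]
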